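-- pv_equiv track=rewrite | github.com/DillibabuShanmugam/FI-Croc-XIF-UMX-CW305 | scripts/hex2mem.py | build_bank_mem
-- ===== SOURCE A (Python) =====
-- def build_bank_mem(mem, bank_base, num_words):
--     """Build list of 32-bit word hex strings for one SRAM bank."""
--     lines = []
--     for w in range(num_words):
--         byte_addr = bank_base + w * 4
--         b0 = mem.get(byte_addr + 0, 0)
--         b1 = mem.get(byte_addr + 1, 0)
--         b2 = mem.get(byte_addr + 2, 0)
--         b3 = mem.get(byte_addr + 3, 0)
--         word = b0 | (b1 << 8) | (b2 << 16) | (b3 << 24)  # little-endian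
--         lines.append(f"{word:08X}")
--     return lines
-- ===== SOURCE B (Python) =====
-- def build_bank_mem(mem, bank_base, num_words):
--     """Build list of 32-bit word hex strings for one SRAM bank.
--
--     Scatter pass: instead of gathering four byte lookups per word, make one
--     pass over mem.items() and OR each byte into its word accumulator."""
--     n = num_words if num_words > 0 else 0
--     words = [0] * n
--     for addr, val in mem.items():
--         off = addr - bank_base
--         if 0 <= off < 4 * n:
--             words[off // 4] |= val << ((off % 4) * 8)
--     return [f"{w:08X}" for w in words]
-- ===== Notes on version B (the rewrite author's own statement) =====
-- stated objective: alternative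
-- what changed: B inverts the traversal: instead of A's per-word gather of four dict lookups, B makes a single scatter pass over mem.items(), ORing each in-range byte into a preallocated word accumulator array, then formats the accumulators; Pre_ excludes association lists with duplicate keys, on which the List (Int x Int) encoding of the Python dict argument is ambiguous (first- vs last-match).
import Mathlib
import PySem

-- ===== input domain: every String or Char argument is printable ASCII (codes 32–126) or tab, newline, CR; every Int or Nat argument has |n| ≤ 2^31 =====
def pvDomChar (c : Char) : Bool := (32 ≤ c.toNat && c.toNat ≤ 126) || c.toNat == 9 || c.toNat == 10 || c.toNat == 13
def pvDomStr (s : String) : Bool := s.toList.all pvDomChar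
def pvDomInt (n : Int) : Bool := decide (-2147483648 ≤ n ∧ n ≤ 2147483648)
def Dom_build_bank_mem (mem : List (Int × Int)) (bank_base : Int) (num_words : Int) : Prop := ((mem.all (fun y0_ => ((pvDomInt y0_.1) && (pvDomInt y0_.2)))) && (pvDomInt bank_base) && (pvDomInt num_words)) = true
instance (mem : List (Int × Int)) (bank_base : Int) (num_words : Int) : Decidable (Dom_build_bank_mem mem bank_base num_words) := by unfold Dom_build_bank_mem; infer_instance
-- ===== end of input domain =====

-- B replaces A's per-word gather of four dict lookups by a single scatter pass over mem
-- that ORs each byte into its word accumulator (objective: alternative, same cost class).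

-- ===== PORT A =====
-- shared helper: exact port of Python's f"{word:08X}" (identical formatting code in both Pythons):
-- uppercase hex digits of |z|, '-' first for negative z, zero-padded to total width 8 (sign included in the width)
def pvHexDigit (n : Nat) : Char := if n < 10 then Char.ofNat (48 + n) else Char.ofNat (55 + n)

def pvHexChars (n : Nat) : List Char :=
  if h : n = 0 then [] else pvHexChars (n / 16) ++ [pvHexDigit (n % 16)]
decreasing_by exact Nat.div_lt_self (Nat.pos_of_ne_zero h) (by omega)

def pvFmt08X (z : Int) : String :=
  if z < 0 then
    let ds := if z.natAbs = 0 then ['0'] else pvHexChars z.natAbs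
    String.mk ('-' :: (List.replicate (7 - ds.length) '0' ++ ds))
  else
    let ds := if z.natAbs = 0 then ['0'] else pvHexChars z.natAbs
    String.mk (List.replicate (8 - ds.length) '0' ++ ds)

def build_bank_mem (mem : List (Int × Int)) (bank_base : Int) (num_words : Int) : List String :=
  (PySem.List.pyRange 0 num_words 1).foldl
    (fun lines w =>
      let byte_addr := bank_base + w * 4
      let b0 := (PySem.Dict.mk mem).getD (byte_addr + 0) 0
      let b1 := (PySem.Dict.mk mem).getD (byte_addr + 1) 0
      let b2 := (PySem.Dict.mk mem).getD (byte_addr + 2) 0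
      let b3 := (PySem.Dict.mk mem).getD (byte_addr + 3) 0
      let word := PySem.Int.bor (PySem.Int.bor (PySem.Int.bor b0 (b1 <<< (8 : Nat))) (b2 <<< (16 : Nat))) (b3 <<< (24 : Nat))
      lines ++ [pvFmt08X word])
    []

-- ===== PORT B =====
def build_bank_mem_alt (mem : List (Int × Int)) (bank_base : Int) (num_words : Int) : List String :=
  let n : Nat := (if 0 < num_words then num_words else 0).toNat
  let words := mem.foldl
    (fun ws p =>
      let off := p.1 - bank_base
      if 0 ≤ off ∧ off < 4 * (n : Int) then
        ws.set (PySem.Int.floordiv off 4).toNat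
          (PySem.Int.bor (ws.getD (PySem.Int.floordiv off 4).toNat 0)
            (p.2 <<< ((PySem.Int.mod off 4).toNat * 8)))
      else ws)
    (List.replicate n 0)
  words.map pvFmt08X

-- ===== PRECONDITION & SPEC =====
-- Pre_ excludes association lists with duplicate keys: mem is a Python dict, whose
-- List (Int × Int) encoding with a repeated key is ambiguous (first- vs last-wins).
def Pre_build_bank_mem (mem : List (Int × Int)) (bank_base : Int) (num_words : Int) : Prop :=
  (mem.map Prod.fst).Nodup

instance (mem : List (Int × Int)) (bank_base : Int) (num_words : Int) : Decidable (Pre_build_bank_mem mem bank_base num_words) := by unfold Pre_build_bank_mem; infer_instance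

def pvWitness_build_bank_mem : (List (Int × Int)) × Int × Int := ([(0, 17), (1, 34), (6, 255)], 0, 2)

def Spec_build_bank_mem (mem : List (Int × Int)) (bank_base : Int) (num_words : Int) (out : List String) : Prop := out = build_bank_mem_alt mem bank_base num_words
instance (mem : List (Int × Int)) (bank_base : Int) (num_words : Int) (out : List String) : Decidable (Spec_build_bank_mem mem bank_base num_words out) := by unfold Spec_build_bank_mem; infer_instance

-- ===== CLAIM (what is proved, stated in full; the proofs are below) =====
def Claim_equal_build_bank_mem : Prop := ∀ (mem : List (Int × Int)) (bank_base : Int) (num_words : Int), Dom_build_bank_mem mem bank_base num_words → Pre_build_bank_mem mem bank_base num_words → Spec_build_bank_mem mem bank_base num_words (build_bank_mem mem bank_base num_words)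

-- ===== LEMMAS AND PROOFS =====

-- ---- bitwise OR on Int is associative/commutative with unit 0 ----
theorem pvLandAddLdiff : ∀ n m : Nat, (n &&& m) + Nat.ldiff n m = n := by
  intro n
  induction n using Nat.binaryRec with
  | zero => intro m; simp [Nat.ldiff]
  | bit b n ih =>
    intro m
    induction m using Nat.bitCasesOn with
    | bit c m' =>
      rw [Nat.land_bit, Nat.ldiff_bit]
      have h := ih m'
      simp only [Nat.bit_val]
      cases b <;> cases c <;>
        simp only [Bool.and_self, Bool.and_true, Bool.and_false, Bool.not_false, Bool.not_true,
          Bool.toNat_false, Bool.toNat_true] <;> omega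

theorem pvSubLand (n m : Nat) : n - (n &&& m) = Nat.ldiff n m := by
  have := pvLandAddLdiff n m; omega

theorem pvBorEqLor (a b : Int) : PySem.Int.bor a b = Int.lor a b := by
  unfold PySem.Int.bor
  rcases a with m | m <;> rcases b with n | n <;>
    simp only [Int.lor, Int.ofNat_eq_natCast, Int.negSucc_eq]
  · simp
  · rw [if_pos (by positivity), if_neg (by omega)]
    have h1 : (- -((n : Int) + 1) - 1).toNat = n := by omega
    rw [h1, Int.toNat_natCast, pvSubLand]
    omega
  · rw [if_neg (by omega), if_pos (by positivity)]
    have h1 : (- -((m : Int) + 1) - 1).toNat = m := by omega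
    rw [h1, Int.toNat_natCast, pvSubLand]
    omega
  · rw [if_neg (by omega), if_neg (by omega)]
    have h1 : (- -((m : Int) + 1) - 1).toNat = m := by omega
    have h2 : (- -((n : Int) + 1) - 1).toNat = n := by omega
    rw [h1, h2]
    omega

theorem pvLorAssoc (a b c : Int) : Int.lor (Int.lor a b) c = Int.lor a (Int.lor b c) := by
  have nat_ext := @Nat.eq_of_testBit_eq
  rcases a with m | m <;> rcases b with n | n <;> rcases c with k | k <;>
    simp only [Int.lor] <;> congr 1 <;>
    apply nat_ext <;> intro i <;>
    simp only [Nat.testBit_lor, Nat.testBit_land, Nat.testBit_ldiff] <;>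
    (generalize m.testBit i = x; generalize n.testBit i = y; generalize k.testBit i = z;
     cases x <;> cases y <;> cases z <;> rfl)

theorem pvBorAssoc (a b c : Int) :
    PySem.Int.bor (PySem.Int.bor a b) c = PySem.Int.bor a (PySem.Int.bor b c) := by
  simp only [pvBorEqLor]; exact pvLorAssoc a b c

theorem pvZeroBor (a : Int) : PySem.Int.bor 0 a = a := by
  rw [PySem.Int.bor_comm]; exact PySem.Int.bor_zero a

theorem pvBorLeftComm (a b c : Int) :
    PySem.Int.bor a (PySem.Int.bor b c) = PySem.Int.bor b (PySem.Int.bor a c) := by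
  rw [← pvBorAssoc, PySem.Int.bor_comm a b, pvBorAssoc]

-- ---- proof-side abbreviations ----

-- A's per-word value
def pvAword (mem : List (Int × Int)) (bank_base : Int) (w : Int) : Int :=
  let byte_addr := bank_base + w * 4
  let b0 := (PySem.Dict.mk mem).getD (byte_addr + 0) 0
  let b1 := (PySem.Dict.mk mem).getD (byte_addr + 1) 0
  let b2 := (PySem.Dict.mk mem).getD (byte_addr + 2) 0
  let b3 := (PySem.Dict.mk mem).getD (byte_addr + 3) 0
  PySem.Int.bor (PySem.Int.bor (PySem.Int.bor b0 (b1 <<< (8 : Nat))) (b2 <<< (16 : Nat))) (b3 <<< (24 : Nat))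

-- B's fold step
def pvStep (bank_base : Int) (n : Nat) (ws : List Int) (p : Int × Int) : List Int :=
  let off := p.1 - bank_base
  if 0 ≤ off ∧ off < 4 * (n : Int) then
    ws.set (PySem.Int.floordiv off 4).toNat
      (PySem.Int.bor (ws.getD (PySem.Int.floordiv off 4).toNat 0)
        (p.2 <<< ((PySem.Int.mod off 4).toNat * 8)))
  else ws

-- the contribution of one mem entry to word slot i
def pvSel (bank_base : Int) (n : Nat) (i : Nat) (p : Int × Int) : Int :=
  let off := p.1 - bank_base
  if 0 ≤ off ∧ off < 4 * (n : Int) ∧ (PySem.Int.floordiv off 4).toNat = i then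
    p.2 <<< ((PySem.Int.mod off 4).toNat * 8)
  else 0

theorem pvStep_length (bank_base : Int) (n : Nat) (ws : List Int) (p : Int × Int) :
    (pvStep bank_base n ws p).length = ws.length := by
  unfold pvStep
  simp only []
  split <;> simp

theorem pvFold_length (mem : List (Int × Int)) (bank_base : Int) (n : Nat) (ws : List Int) :
    (mem.foldl (pvStep bank_base n) ws).length = ws.length := by
  induction mem generalizing ws with
  | nil => rfl
  | cons p t ih => rw [List.foldl_cons, ih, pvStep_length]

-- slot characterisation of B's fold
theorem pvFold_getD (mem : List (Int × Int)) (bank_base : Int) (n : Nat) (ws : List Int)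
    (i : Nat) (hi : i < ws.length) :
    (mem.foldl (pvStep bank_base n) ws).getD i 0 =
      mem.foldl (fun acc p => PySem.Int.bor acc (pvSel bank_base n i p)) (ws.getD i 0) := by
  induction mem generalizing ws with
  | nil => rfl
  | cons p t ih =>
    simp only [List.foldl_cons]
    rw [ih _ (by rw [pvStep_length]; exact hi)]
    congr 1
    unfold pvStep pvSel
    by_cases hg : 0 ≤ p.1 - bank_base ∧ p.1 - bank_base < 4 * (n : Int)
    · by_cases hj : (PySem.Int.floordiv (p.1 - bank_base) 4).toNat = i
      · rw [if_pos hg, if_pos ⟨hg.1, hg.2, hj⟩, hj]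
        rw [List.getD_eq_getElem _ _ (by simpa using hi)]
        simp [hi]
      · rw [if_pos hg, if_neg (by tauto), PySem.Int.bor_zero]
        have hj' : ((p.1 - bank_base) / 4).toNat ≠ i := by
          rwa [← PySem.Int.floordiv_eq_ediv_of_pos (by norm_num : (0:Int) < 4)]
        simp only [List.getD]
        rw [List.getElem?_set]
        simp [hj']
    · rw [if_neg hg, if_neg (by tauto), PySem.Int.bor_zero]

-- pulling the accumulator out of a bor-fold
theorem pvFoldBor_acc (l : List (Int × Int)) (f : Int × Int → Int) (acc : Int) :
    l.foldl (fun a p => PySem.Int.bor a (f p)) acc =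
      PySem.Int.bor acc (l.foldl (fun a p => PySem.Int.bor a (f p)) 0) := by
  induction l generalizing acc with
  | nil => simp [PySem.Int.bor_zero]
  | cons p t ih =>
    simp only [List.foldl_cons]
    rw [ih (PySem.Int.bor acc (f p)), ih (PySem.Int.bor 0 (f p)), pvZeroBor, pvBorAssoc]

-- dict-lookup helpers
theorem pvGetD_cons (p : Int × Int) (t : List (Int × Int)) (a : Int) :
    (PySem.Dict.mk (p :: t)).getD a 0 = if p.1 = a then p.2 else (PySem.Dict.mk t).getD a 0 := by
  rcases p with ⟨k, v⟩
  rw [PySem.Dict.getD_eq_get?_getD, PySem.Dict.get?_mk_cons]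
  by_cases h : k = a
  · simp [h]
  · simp [h, PySem.Dict.getD_eq_get?_getD]

theorem pvGetD_not_mem (t : List (Int × Int)) (a : Int) (h : a ∉ t.map Prod.fst) :
    (PySem.Dict.mk t).getD a 0 = 0 := by
  rw [PySem.Dict.getD_eq_get?_getD,
    (PySem.Dict.get?_eq_none_iff_not_mem_keys _ _).mpr (by simpa [PySem.Dict.keys_mk] using h)]
  rfl

-- pvSel at one of slot i's four byte addresses
theorem pvSel_at (bank_base : Int) (n i j : Nat) (hi : i < n) (hj : j < 4)
    (p : Int × Int) (hp : p.1 = bank_base + (i : Int) * 4 + (j : Int)) :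
    pvSel bank_base n i p = p.2 <<< (j * 8) := by
  unfold pvSel
  have hfd : PySem.Int.floordiv (p.1 - bank_base) 4 = (i : Int) := by
    rw [PySem.Int.floordiv_eq_iff_of_pos (by norm_num)]
    constructor <;> omega
  have hmd := PySem.Int.floordiv_mul_add_mod (p.1 - bank_base) 4
  rw [hfd] at hmd
  have hm : PySem.Int.mod (p.1 - bank_base) 4 = (j : Int) := by omega
  rw [if_pos ⟨by omega, by omega, by rw [hfd]; simp⟩, hm]
  simp

-- pvSel vanishes away from slot i's four byte addresses
theorem pvSel_notin (bank_base : Int) (n i : Nat) (p : Int × Int)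
    (h0 : p.1 ≠ bank_base + (i : Int) * 4 + 0) (h1 : p.1 ≠ bank_base + (i : Int) * 4 + 1)
    (h2 : p.1 ≠ bank_base + (i : Int) * 4 + 2) (h3 : p.1 ≠ bank_base + (i : Int) * 4 + 3) :
    pvSel bank_base n i p = 0 := by
  unfold pvSel
  rw [if_neg]
  rintro ⟨ha, hb, hc⟩
  have hmd := PySem.Int.floordiv_mul_add_mod (p.1 - bank_base) 4
  have hm0 : 0 ≤ PySem.Int.mod (p.1 - bank_base) 4 := PySem.Int.mod_nonneg _ (by norm_num)
  have hm4 : PySem.Int.mod (p.1 - bank_base) 4 < 4 := PySem.Int.mod_lt _ (by norm_num)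
  have hf0 : 0 ≤ PySem.Int.floordiv (p.1 - bank_base) 4 := by
    rw [PySem.Int.le_floordiv_iff_mul_le (by norm_num)]; omega
  have hfi : PySem.Int.floordiv (p.1 - bank_base) 4 = (i : Int) := by omega
  rw [hfi] at hmd
  omega

-- the scatter fold over mem computes A's word, given unique keys
theorem pvFoldSel (mem : List (Int × Int)) (bank_base : Int) (n : Nat) (i : Nat)
    (hnd : (mem.map Prod.fst).Nodup) (hi : i < n) :
    mem.foldl (fun acc p => PySem.Int.bor acc (pvSel bank_base n i p)) 0 =
      pvAword mem bank_base i := by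
  induction mem with
  | nil =>
    simp [pvAword, PySem.Dict.getD_eq_get?_getD, PySem.Dict.get?, Int.zero_shiftLeft,
      PySem.Int.bor_zero]
  | cons p t ih =>
    simp only [List.map_cons, List.nodup_cons] at hnd
    simp only [List.foldl_cons]
    rw [pvFoldBor_acc, ih hnd.2, pvZeroBor]
    simp only [pvAword, pvGetD_cons]
    by_cases e0 : p.1 = bank_base + (i : Int) * 4 + 0
    · rw [pvSel_at bank_base n i 0 hi (by norm_num) p (by push_cast; omega)]
      rw [pvGetD_not_mem t (bank_base + (i : Int) * 4 + 0) (by rw [← e0]; exact hnd.1)]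
      rw [if_pos e0, if_neg (by omega), if_neg (by omega), if_neg (by omega)]
      simp [pvBorLeftComm, PySem.Int.bor_comm, pvZeroBor]
    · by_cases e1 : p.1 = bank_base + (i : Int) * 4 + 1
      · rw [pvSel_at bank_base n i 1 hi (by norm_num) p (by push_cast; omega)]
        rw [pvGetD_not_mem t (bank_base + (i : Int) * 4 + 1) (by rw [← e1]; exact hnd.1)]
        rw [if_neg (by omega), if_pos e1, if_neg (by omega), if_neg (by omega)]
        simp [pvBorLeftComm, PySem.Int.bor_comm, pvZeroBor]
      · by_cases e2 : p.1 = bank_base + (i : Int) * 4 + 2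
        · rw [pvSel_at bank_base n i 2 hi (by norm_num) p (by push_cast; omega)]
          rw [pvGetD_not_mem t (bank_base + (i : Int) * 4 + 2) (by rw [← e2]; exact hnd.1)]
          rw [if_neg (by omega), if_neg (by omega), if_pos e2, if_neg (by omega)]
          simp [pvBorLeftComm, PySem.Int.bor_comm, pvZeroBor]
        · by_cases e3 : p.1 = bank_base + (i : Int) * 4 + 3
          · rw [pvSel_at bank_base n i 3 hi (by norm_num) p (by push_cast; omega)]
            rw [pvGetD_not_mem t (bank_base + (i : Int) * 4 + 3) (by rw [← e3]; exact hnd.1)]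
            rw [if_neg (by omega), if_neg (by omega), if_neg (by omega), if_pos e3]
            simp [pvBorLeftComm, PySem.Int.bor_comm, pvZeroBor]
          · rw [pvSel_notin bank_base n i p e0 e1 e2 e3]
            rw [if_neg e0, if_neg e1, if_neg e2, if_neg e3, pvZeroBor]

-- A is a map over the range
theorem pvA_map (mem : List (Int × Int)) (bank_base : Int) (num_words : Int) :
    build_bank_mem mem bank_base num_words =
      (PySem.List.pyRange 0 num_words 1).map (fun w => pvFmt08X (pvAword mem bank_base w)) := by
  unfold build_bank_mem
  rw [PySem.List.foldl_append_singleton_eq_map]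
  rfl

-- ===== VERDICT (by name: the statement is the Claim_ definition above) =====
theorem build_bank_mem_spec : Claim_equal_build_bank_mem := by
  unfold Claim_equal_build_bank_mem
  intro mem bank_base num_words _ hpre
  unfold Spec_build_bank_mem
  rw [pvA_map]
  show _ = ((mem.foldl (pvStep bank_base (if 0 < num_words then num_words else 0).toNat)
      (List.replicate (if 0 < num_words then num_words else 0).toNat 0)).map pvFmt08X)
  have hn : (num_words - 0).toNat = (if 0 < num_words then num_words else 0).toNat := by
    split <;> omega
  apply List.ext_getElem
  · simp only [List.length_map, PySem.List.length_pyRange_one, pvFold_length,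
      List.length_replicate]
    omega
  · intro k h1 h2
    have hkr : k < (PySem.List.pyRange 0 num_words 1).length := by
      simpa using h1
    have hk : k < (if 0 < num_words then num_words else 0).toNat := by
      rw [PySem.List.length_pyRange_one] at hkr
      omega
    rw [List.getElem_map, List.getElem_map, PySem.List.getElem_pyRange_one _ _ _ hkr]
    have hlen : k < (mem.foldl (pvStep bank_base (if 0 < num_words then num_words else 0).toNat)
        (List.replicate (if 0 < num_words then num_words else 0).toNat 0)).length := by
      rw [pvFold_length]; simpa using hk
    rw [← List.getD_eq_getElem _ 0 hlen,
      pvFold_getD _ _ _ _ _ (by simpa using hk)]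
    have hrep : (List.replicate (if 0 < num_words then num_words else 0).toNat (0 : Int)).getD k 0 = 0 := by
      simp [List.getD]
    rw [hrep, pvFoldSel mem bank_base _ k hpre hk]
    norm_num
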